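-- pv_equiv track=rewrite | github.com/ch2ohchohch2oh66/Scripts | algorithm/realTest.py | dfs
-- ===== SOURCE A (Python) =====
-- def dfs(node, target_set, visited, graph):
--     visited.add(node)
--     count = 1 if node in target_set else 0
--     max_count = count
--     for neighbor in graph[node]:
--         if neighbor not in visited:
--             sub_count = dfs(neighbor, target_set, visited, graph)
--             max_count = max(max_count, count + sub_count)
--     return max_count
-- ===== SOURCE B (Python) =====
-- def dfs(node, target_set, visited, graph):
--     # Iterative DFS with an explicit stack of frames; same traversal order,
--     # same in-place mutation of `visited`, same return value as the recursion.
--     visited.add(node)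
--     c0 = 1 if node in target_set else 0
--     stack = [[iter(graph[node]), c0, c0]]  # frame = [neighbor iterator, count, max_count]
--     while True:
--         frame = stack[-1]
--         n = next(frame[0], None)
--         if n is None:  # neighbors exhausted: pop, fold result into parent
--             stack.pop()
--             if not stack:
--                 return frame[2]
--             parent = stack[-1]
--             parent[2] = max(parent[2], parent[1] + frame[2])
--         elif n not in visited:
--             visited.add(n)
--             c = 1 if n in target_set else 0
--             stack.append([iter(graph[n]), c, c])
-- ===== Notes on version B (the rewrite author's own statement) =====
-- stated objective: alternative
-- what changed: The recursive DFS is replaced by an iterative DFS over an explicit stack of frames (neighbor iterator, count, running max), which also cannot hit Python's recursion-depth limit; traversal order, visited mutation and return value are identical.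
import Mathlib
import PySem

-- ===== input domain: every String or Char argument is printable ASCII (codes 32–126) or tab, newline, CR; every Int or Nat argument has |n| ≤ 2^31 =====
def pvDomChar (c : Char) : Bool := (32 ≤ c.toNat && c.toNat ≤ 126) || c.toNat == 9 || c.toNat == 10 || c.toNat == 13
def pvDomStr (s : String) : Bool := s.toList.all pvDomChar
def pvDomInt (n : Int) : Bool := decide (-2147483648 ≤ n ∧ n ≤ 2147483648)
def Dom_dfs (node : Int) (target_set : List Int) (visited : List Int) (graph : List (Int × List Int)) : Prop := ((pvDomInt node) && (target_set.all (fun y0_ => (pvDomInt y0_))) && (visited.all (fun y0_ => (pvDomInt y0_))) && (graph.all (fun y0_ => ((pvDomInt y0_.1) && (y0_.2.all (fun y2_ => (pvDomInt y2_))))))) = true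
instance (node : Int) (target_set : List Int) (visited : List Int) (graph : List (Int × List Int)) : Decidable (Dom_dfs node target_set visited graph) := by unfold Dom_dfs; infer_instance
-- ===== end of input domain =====

-- B replaces A's recursive DFS by an iterative DFS over an explicit stack of frames
-- (same traversal order and return value; equivalence proved about the RETURN value only —
-- both Pythons mutate `visited` in place identically).


-- Fuel is a termination artifact only: it bounds the number of elementary DFS events
-- (entries, neighbor checks, returns); on every input admitted by Pre_dfs it is ample,
-- and the equivalence below holds for EVERY fuel value, so it plays no role in the claim.
def dfsFuel (graph : List (Int × List Int)) : Nat :=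
  graph.length + (graph.map (fun p => p.2.length)).sum + 2

-- ===== PORT A =====
-- Literal port of A's recursion: `dfsEnterA` is the body of Python `dfs`
-- (visited.add, count, then the for-loop `dfsLoopA` with a recursive call per
-- unvisited neighbor).  The mutated `visited` set and the remaining fuel are
-- threaded through as explicit state; `graph[node]` with a missing key is
-- Python's KeyError (excluded by Pre_dfs; the port yields a dummy 0 there).
mutual
def dfsEnterA (fuel : Nat) (node : Int) (ts : List Int) (v : PySem.Set Int)
    (g : List (Int × List Int)) : Option (Int × PySem.Set Int × Nat) :=
  let v1 := PySem.Set.add v node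
  let c : Int := if node ∈ ts then 1 else 0
  match g.lookup node with
  | none => some (0, v1, fuel)          -- KeyError in Python: outside Pre_dfs
  | some ns => dfsLoopA fuel ns ts v1 g c c
termination_by (fuel, 1)

def dfsLoopA (fuel : Nat) (ns : List Int) (ts : List Int) (v : PySem.Set Int)
    (g : List (Int × List Int)) (c m : Int) : Option (Int × PySem.Set Int × Nat) :=
  match fuel, ns with
  | 0, _ => none
  | f + 1, [] => some (m, v, f)
  | f + 1, n :: rest =>
    if n ∈ v then dfsLoopA f rest ts v g c m
    else
      match dfsEnterA f n ts v g with
      | none => none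
      | some (s, v', f') =>
        -- `min f' f` = f' (proved below): the recursive call never gains fuel
        dfsLoopA (min f' f) rest ts v' g c (max m (c + s))
termination_by (fuel, 0)
decreasing_by all_goals simp_wf; omega
end

def dfs (node : Int) (target_set : List Int) (visited : List Int) (graph : List (Int × List Int)) : Int :=
  match dfsEnterA (dfsFuel graph) node target_set (PySem.Set.ofList visited) graph with
  | some (m, _, _) => m
  | none => 0

-- ===== PORT B =====
-- Literal port of B: a single loop over an explicit stack of frames
-- (remaining neighbors, count, running max_count), visited threaded as state.
def dfsRunB (fuel : Nat) (ts : List Int) (g : List (Int × List Int)) (v : PySem.Set Int)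
    (stack : List (List Int × Int × Int)) : Option Int :=
  match fuel with
  | 0 => none
  | f + 1 =>
    match stack with
    | [] => none                         -- unreachable: the stack starts non-empty
    | (rem, c, m) :: fs =>
      match rem with
      | [] =>                            -- neighbors exhausted: pop, fold into parent
        match fs with
        | [] => some m
        | (prem, pc, pm) :: ps => dfsRunB f ts g v ((prem, pc, max pm (pc + m)) :: ps)
      | n :: rest =>
        if n ∈ v then dfsRunB f ts g v ((rest, c, m) :: fs)
        else
          let v1 := PySem.Set.add v n
          let c' : Int := if n ∈ ts then 1 else 0
          match g.lookup n with
          | none => dfsRunB f ts g v1 ((rest, c, max m (c + 0)) :: fs)  -- KeyError in Python: outside Pre_dfs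
          | some ns => dfsRunB f ts g v1 ((ns, c', c') :: (rest, c, m) :: fs)

def dfs_alt (node : Int) (target_set : List Int) (visited : List Int) (graph : List (Int × List Int)) : Int :=
  let v1 := PySem.Set.add (PySem.Set.ofList visited) node
  let c : Int := if node ∈ target_set then 1 else 0
  match graph.lookup node with
  | none => 0                            -- KeyError in Python: outside Pre_dfs
  | some ns =>
    match dfsRunB (dfsFuel graph) target_set graph v1 [(ns, c, c)] with
    | some m => m
    | none => 0

-- ===== PRECONDITION & SPEC =====
-- One step of plain graph reachability: add every neighbor (not initially visited)
-- of an already-reached node.  Used only to STATE Pre_dfs; it computes no counts and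
-- is unrelated to either port's algorithm.
def pvReachStep (visited : List Int) (graph : List (Int × List Int)) (R : PySem.Set Int) : PySem.Set Int :=
  PySem.Set.update R (R.flatMap (fun u =>
    match graph.lookup u with
    | some ns => ns.filter (fun n => decide (n ∉ visited))
    | none => []))

-- Pre_dfs excludes exactly the inputs on which Python raises KeyError at `graph[...]`:
-- it says every node reachable from `node` through vertices not initially in `visited`
-- (the nodes the DFS enters) is a key of `graph`.  dfsFuel graph iterations of the
-- closure step surely reach the fixpoint (the reachable set cannot grow longer).
def Pre_dfs (node : Int) (target_set : List Int) (visited : List Int) (graph : List (Int × List Int)) : Prop :=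
  ∀ u ∈ (pvReachStep visited graph)^[dfsFuel graph] (PySem.Set.ofList [node]),
    graph.lookup u ≠ none
instance (node : Int) (target_set : List Int) (visited : List Int) (graph : List (Int × List Int)) : Decidable (Pre_dfs node target_set visited graph) := by unfold Pre_dfs; infer_instance

def pvWitness_dfs : Int × List Int × List Int × (List (Int × List Int)) :=
  (0, [0, 2], [2], [(0, [1, 2]), (1, [0]), (2, [])])

def Spec_dfs (node : Int) (target_set : List Int) (visited : List Int) (graph : List (Int × List Int)) (out : Int) : Prop := out = dfs_alt node target_set visited graph
instance (node : Int) (target_set : List Int) (visited : List Int) (graph : List (Int × List Int)) (out : Int) : Decidable (Spec_dfs node target_set visited graph out) := by unfold Spec_dfs; infer_instance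

-- ===== CLAIM (what is proved, stated in full; the proofs are below) =====
def Claim_equal_dfs : Prop := ∀ (node : Int) (target_set : List Int) (visited : List Int) (graph : List (Int × List Int)), Dom_dfs node target_set visited graph → Pre_dfs node target_set visited graph → Spec_dfs node target_set visited graph (dfs node target_set visited graph)

-- ===== LEMMAS AND PROOFS =====

-- What B's machine does after popping a finished frame with result r into the stack fs.
def pvCont (ts : List Int) (g : List (Int × List Int)) (f' : Nat) (v' : PySem.Set Int)
    (fs : List (List Int × Int × Int)) (r : Int) : Option Int :=
  match fs with
  | [] => some r
  | (prem, pc, pm) :: ps => dfsRunB f' ts g v' ((prem, pc, max pm (pc + r)) :: ps)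

-- A's loop never returns with more fuel than it was given.
lemma dfsLoopA_fuel_le (f : Nat) :
    ∀ (ns ts : List Int) (v : PySem.Set Int) (g : List (Int × List Int)) (c m r : Int)
      (v' : PySem.Set Int) (f' : Nat),
      dfsLoopA f ns ts v g c m = some (r, v', f') → f' ≤ f := by
  induction f using Nat.strong_induction_on with
  | _ f IH =>
    intro ns ts v g c m r v' f' h
    match f, ns with
    | 0, ns => simp [dfsLoopA] at h
    | f + 1, [] =>
      simp [dfsLoopA] at h
      omega
    | f + 1, n :: rest =>
      rw [dfsLoopA] at h
      by_cases hv : n ∈ v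
      · simp only [hv, if_true] at h
        have := IH f (by omega) rest ts v g c m r v' f' h
        omega
      · simp only [hv, if_false] at h
        rw [dfsEnterA] at h
        cases hlook : g.lookup n with
        | none =>
          simp only [hlook, Nat.min_self] at h
          have := IH f (by omega) rest ts _ g c _ r v' f' h
          omega
        | some ns' =>
          simp only [hlook] at h
          cases hrec : dfsLoopA f ns' ts (PySem.Set.add v n) g
              (if n ∈ ts then (1:Int) else 0) (if n ∈ ts then (1:Int) else 0) with
          | none => simp [hrec] at h
          | some t =>
            obtain ⟨s, v2, f2⟩ := t
            simp only [hrec] at h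
            have := IH (min f2 f) (by omega) rest ts v2 g c (max m (c + s)) r v' f' h
            omega

-- Key simulation lemma: B's machine run on a stack whose top frame is (ns, c, m)
-- computes A's loop on ns and then continues with the popped result.
lemma dfsRunB_eq (f : Nat) :
    ∀ (ns ts : List Int) (v : PySem.Set Int) (g : List (Int × List Int)) (c m : Int)
      (fs : List (List Int × Int × Int)),
      dfsRunB f ts g v ((ns, c, m) :: fs) =
        match dfsLoopA f ns ts v g c m with
        | none => none
        | some (r, v', f') => pvCont ts g f' v' fs r := by
  induction f using Nat.strong_induction_on with
  | _ f IH =>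
    intro ns ts v g c m fs
    match f, ns with
    | 0, ns => simp [dfsRunB.eq_def, dfsLoopA]
    | f + 1, [] =>
      rw [dfsRunB.eq_def, dfsLoopA]
      cases fs with
      | nil => rfl
      | cons p ps => obtain ⟨prem, pc, pm⟩ := p; rfl
    | f + 1, n :: rest =>
      rw [dfsRunB.eq_def, dfsLoopA]
      by_cases hv : n ∈ v
      · simp only [hv, if_true]
        exact IH f (by omega) rest ts v g c m fs
      · simp only [hv, if_false]
        rw [dfsEnterA]
        cases hlook : g.lookup n with
        | none =>
          dsimp only
          rw [IH f (by omega) rest ts _ g c _ fs]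
          simp
        | some ns' =>
          dsimp only
          rw [IH f (by omega) ns' ts (PySem.Set.add v n) g _ _ ((rest, c, m) :: fs)]
          cases hrec : dfsLoopA f ns' ts (PySem.Set.add v n) g
              (if n ∈ ts then (1:Int) else 0) (if n ∈ ts then (1:Int) else 0) with
          | none => rfl
          | some t =>
            obtain ⟨s, v2, f2⟩ := t
            have hle : f2 ≤ f := dfsLoopA_fuel_le f ns' ts _ g _ _ s v2 f2 hrec
            have hmin : min f2 f = f2 := Nat.min_eq_left hle
            simp only [pvCont, hmin]
            exact IH f2 (by omega) rest ts v2 g c (max m (c + s)) fs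

-- ===== VERDICT (by name: the statement is the Claim_ definition above) =====
theorem dfs_spec : Claim_equal_dfs := by
  unfold Claim_equal_dfs
  intro node ts visited graph _ _
  unfold Spec_dfs dfs dfs_alt
  rw [dfsEnterA]
  cases hlook : graph.lookup node with
  | none => rfl
  | some ns =>
    dsimp only
    rw [dfsRunB_eq (dfsFuel graph) ns ts _ graph _ _ []]
    cases h : dfsLoopA (dfsFuel graph) ns ts
        (PySem.Set.add (PySem.Set.ofList visited) node) graph
        (if node ∈ ts then (1:Int) else 0) (if node ∈ ts then (1:Int) else 0) with
    | none => rfl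
    | some t => obtain ⟨r, v', f'⟩ := t; rfl
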